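-- pv_equiv track=rewrite | github.com/pypi-data/pypi-mirror-115 | packages/null-bot-api/null_bot_api-0.1.0.tar.gz/null_bot_api-0.1.0/null_bot_api/api.py | data_to_print
-- ===== SOURCE A (Python) =====
-- from typing import Type, TypeVar, Dict
--
-- def data_to_print(data: Dict) -> Dict:
--     new_dict = {}
--     for k, v in data.items():
--         if k == 'access_token':
--             new_dict[k] = v[:4] + '*' * 4 + v[-4:]
--         else:
--             new_dict[k] = v
--     return new_dict
-- ===== SOURCE B (Python) =====
-- def data_to_print(data):
--     items = list(data.items())
--     keys = [k for k, _ in items]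
--     try:
--         i = keys.index('access_token')
--     except ValueError:
--         return dict(items)
--     k, v = items[i]
--     return dict(items[:i] + [(k, v[:4] + '*' * 4 + v[-4:])] + items[i + 1:])
-- ===== Notes on version B (the rewrite author's own statement) =====
-- stated objective: alternative
-- what changed: B locates the position of 'access_token' in the key list (list.index) and splices a single masked entry between the untouched slices items[:i] and items[i+1:], instead of A's entry-by-entry rebuild of the whole dict with a branch on every key.
import Mathlib
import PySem

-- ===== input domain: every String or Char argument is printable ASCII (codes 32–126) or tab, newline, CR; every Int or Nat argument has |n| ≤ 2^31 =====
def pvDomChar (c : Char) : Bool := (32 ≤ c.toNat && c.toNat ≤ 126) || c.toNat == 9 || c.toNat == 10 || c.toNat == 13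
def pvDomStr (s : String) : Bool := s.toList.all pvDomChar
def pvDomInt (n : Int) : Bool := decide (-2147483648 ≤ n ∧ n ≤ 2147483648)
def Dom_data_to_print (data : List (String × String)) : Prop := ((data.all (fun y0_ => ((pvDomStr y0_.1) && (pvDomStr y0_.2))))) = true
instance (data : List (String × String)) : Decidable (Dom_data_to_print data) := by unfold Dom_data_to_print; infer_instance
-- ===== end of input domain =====

-- B locates the position of 'access_token' in the key list and splices one masked entry between
-- the untouched slices items[:i] and items[i+1:], instead of A's branch-per-key rebuild loop
-- (objective: alternative decomposition; same return value).


-- v[:4] + '*' * 4 + v[-4:]  (the same sub-expression occurs verbatim in both Pythons)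
def pvMask (v : String) : String :=
  String.ofList (PySem.List.slice v.toList none (some 4) ++ ['*', '*', '*', '*'] ++
             PySem.List.slice v.toList (some (-4)) none)

-- ===== PORT A =====
def data_to_print (data : List (String × String)) : List (String × String) :=
  (data.foldl (fun new_dict p =>
      if p.1 == "access_token" then new_dict.insert p.1 (pvMask p.2)
      else new_dict.insert p.1 p.2)
    PySem.Dict.empty).items

-- ===== PORT B =====
def data_to_print_alt (data : List (String × String)) : List (String × String) :=
  let items := (PySem.Dict.ofList data).items
  let keys := items.map (fun p => p.1)
  match PySem.List.index? keys "access_token" with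
  | none => (PySem.Dict.ofList items).items
  | some i =>
    -- items[i]: index? always returns an in-range index, so the 'none' arm is unreachable
    match PySem.List.pyGet? items (i : Int) with
    | none => (PySem.Dict.ofList items).items
    | some kv =>
      (PySem.Dict.ofList (PySem.List.slice items none (some (i : Int)) ++
        [(kv.1, pvMask kv.2)] ++
        PySem.List.slice items (some ((i : Int) + 1)) none)).items

-- ===== PRECONDITION & SPEC =====
def Spec_data_to_print (data : List (String × String)) (out : List (String × String)) : Prop := out = data_to_print_alt data
instance (data : List (String × String)) (out : List (String × String)) : Decidable (Spec_data_to_print data out) := by unfold Spec_data_to_print; infer_instance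

-- ===== CLAIM (what is proved, stated in full; the proofs are below) =====
def Claim_equal_data_to_print : Prop := ∀ (data : List (String × String)), Dom_data_to_print data → Spec_data_to_print data (data_to_print data)

-- ===== LEMMAS AND PROOFS =====

-- the per-entry rewrite A applies: mask the value of an 'access_token' entry, keep the rest
def pvH (p : String × String) : String × String :=
  if p.1 = "access_token" then (p.1, pvMask p.2) else p

theorem pvH_fst (p : String × String) : (pvH p).1 = p.1 := by
  unfold pvH; split <;> simp_all

theorem pv_keys_map (d d' : PySem.Dict String String)
    (h : d.items = d'.items.map pvH) : d.keys = d'.keys := by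
  simp only [PySem.Dict.keys, h, List.map_map]
  congr 1
  funext p
  exact pvH_fst p

-- A's loop, run from any accumulator that is the pvH-image of the plain-insert fold, stays the pvH-image
theorem pv_invariant (l : List (String × String)) :
    ∀ (dA dB : PySem.Dict String String), dA.items = dB.items.map pvH →
    (l.foldl (fun nd p =>
        if p.1 == "access_token" then nd.insert p.1 (pvMask p.2)
        else nd.insert p.1 p.2) dA).items
      = ((l.foldl (fun nd p => nd.insert p.1 p.2) dB).items).map pvH := by
  induction l with
  | nil => intro dA dB h; simpa using h
  | cons p t ih =>
    intro dA dB h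
    simp only [List.foldl_cons]
    have hstep : (if p.1 == "access_token" then dA.insert p.1 (pvMask p.2)
                  else dA.insert p.1 p.2).items
        = ((dB.insert p.1 p.2).items).map pvH := by
      have hc : dA.contains p.1 = dB.contains p.1 := by
        rw [PySem.Dict.contains_eq_decide_mem_keys, PySem.Dict.contains_eq_decide_mem_keys,
            pv_keys_map dA dB h]
      have hins : (dA.insert p.1 (if p.1 = "access_token" then pvMask p.2 else p.2)).items
          = ((dB.insert p.1 p.2).items).map pvH := by
        rw [PySem.Dict.items_insert, PySem.Dict.items_insert, hc]
        by_cases hmem : dB.contains p.1 = true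
        · simp only [hmem, if_true, h, List.map_map]
          congr 1
          funext q
          simp only [Function.comp]
          unfold pvH
          by_cases hq : q.1 = p.1 <;> by_cases hat : q.1 = "access_token" <;>
            by_cases hpat : p.1 = "access_token" <;> simp_all
        · simp only [hmem, h]
          unfold pvH
          by_cases hat : p.1 = "access_token" <;> simp_all
      by_cases hat : p.1 = "access_token"
      · simpa [hat] using hins
      · simpa [hat] using hins
    exact ih _ _ hstep

-- dict(l) round-trips a list whose keys are already distinct
theorem pv_ofList_items (l : List (String × String)) (h : (l.map Prod.fst).Nodup) :
    (PySem.Dict.ofList l).items = l := by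
  have := PySem.Dict.items_foldl_insert_fresh (l := l) (k := Prod.fst) (v := Prod.snd)
    (d := (PySem.Dict.empty : PySem.Dict String String))
    (by intro a _; simp) h
  simpa using this

-- B's locate-and-splice equals mapping pvH over the items, given unique keys
theorem pv_splice (items : List (String × String)) (hnd : (items.map Prod.fst).Nodup) :
    (match PySem.List.index? (items.map (fun p => p.1)) "access_token" with
     | none => (PySem.Dict.ofList items).items
     | some i =>
       match PySem.List.pyGet? items (i : Int) with
       | none => (PySem.Dict.ofList items).items
       | some kv =>
         (PySem.Dict.ofList (PySem.List.slice items none (some (i : Int)) ++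
           [(kv.1, pvMask kv.2)] ++
           PySem.List.slice items (some ((i : Int) + 1)) none)).items)
    = items.map pvH := by
  cases hidx : PySem.List.index? (items.map (fun p => p.1)) "access_token" with
  | none =>
    have hnm : "access_token" ∉ items.map (fun p => p.1) :=
      (PySem.List.index?_eq_none_iff _ _).mp hidx
    have hmap : items.map pvH = items := by
      have hq : ∀ q ∈ items, pvH q = id q := by
        intro q hq
        have : q.1 ≠ "access_token" := by
          intro he
          exact hnm (he ▸ List.mem_map_of_mem hq)
        simp [pvH, this]
      rw [List.map_congr_left hq, List.map_id]
    simp only [hmap]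
    exact pv_ofList_items items hnd
  | some i =>
    obtain ⟨hk, hki, hmin⟩ := PySem.List.getElem_of_index?_eq_some hidx
    have hil : i < items.length := by simpa using hk
    have hget : PySem.List.pyGet? items (i : Int) = some items[i] := by
      rw [PySem.List.pyGet?_natCast]
      simp [hil]
    simp only [hget]
    have hkey : (items[i]'hil).1 = "access_token" := by
      have : (items.map (fun p => p.1))[i]'hk = (items[i]'hil).1 := by
        simp
      rw [← this, hki]
    -- the spliced list IS items.map pvH
    have hto : PySem.List.slice items none (some (i : Int)) = items.take i :=
      PySem.List.slice_to_natCast items i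
    have hfrom : PySem.List.slice items (some ((i : Int) + 1)) none = items.drop (i + 1) := by
      have := PySem.List.slice_from_natCast items (i + 1)
      push_cast at this
      exact this
    -- take-side keys differ from "access_token" (minimality of index?)
    have htake : (items.take i).map pvH = items.take i := by
      rw [show items.take i = (items.take i).map id by simp]
      rw [List.map_map]
      apply List.map_congr_left
      intro q hq
      simp only [Function.comp, id]
      obtain ⟨j, hj, hje⟩ := List.getElem_of_mem hq
      have hjt : j < i := lt_of_lt_of_le hj (by simp)
      have hjlen : j < items.length := lt_trans hjt hil
      have hne : q.1 ≠ "access_token" := by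
        have h1 := hmin j hjt
        rw [List.getElem_take] at hje
        intro he
        apply h1
        simp [hje, he]
      simp [pvH, hne]
    -- drop-side keys differ from "access_token" (nodup of keys)
    have hdrop : (items.drop (i + 1)).map pvH = items.drop (i + 1) := by
      rw [show items.drop (i + 1) = (items.drop (i + 1)).map id by simp]
      rw [List.map_map]
      apply List.map_congr_left
      intro q hq
      simp only [Function.comp, id]
      have hmem : q.1 ∈ (items.map Prod.fst).drop (i + 1) := by
        rw [← List.map_drop]
        exact List.mem_map_of_mem hq
      have hsplit : items.map Prod.fst
          = (items.map Prod.fst).take (i + 1) ++ (items.map Prod.fst).drop (i + 1) :=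
        (List.take_append_drop _ _).symm
      have hnd' := hnd
      rw [hsplit] at hnd'
      have hdisj := (List.nodup_append.mp hnd').2.2
      have hmemtake : "access_token" ∈ (items.map Prod.fst).take (i + 1) := by
        have : ((items.map Prod.fst).take (i + 1))[i]'(by
            simp [List.length_take]; omega) = "access_token" := by
          rw [List.getElem_take]
          simpa using hki
        exact this ▸ List.getElem_mem _
      have hne : q.1 ≠ "access_token" := by
        intro he
        exact hdisj "access_token" hmemtake q.1 hmem he.symm
      simp [pvH, hne]
    have hsplice : items.take i ++ [((items[i]'hil).1, pvMask (items[i]'hil).2)] ++ items.drop (i + 1)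
        = items.map pvH := by
      conv_rhs => rw [← List.take_append_drop i items]
      have hdropc : items.drop i = items[i] :: items.drop (i + 1) :=
        List.drop_eq_getElem_cons hil
      rw [hdropc]
      simp only [List.map_append, List.map_cons]
      rw [htake, hdrop]
      have : pvH (items[i]'hil) = ((items[i]'hil).1, pvMask (items[i]'hil).2) := by
        simp [pvH, hkey]
      rw [this]
      simp
    rw [hto, hfrom, hsplice]
    apply pv_ofList_items
    have : (items.map pvH).map Prod.fst = items.map Prod.fst := by
      rw [List.map_map]; exact List.map_congr_left (fun p _ => pvH_fst p)
    rw [this]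
    exact hnd

-- ===== VERDICT (by name: the statement is the Claim_ definition above) =====
theorem data_to_print_spec : Claim_equal_data_to_print := by
  intro data _
  unfold Spec_data_to_print data_to_print data_to_print_alt
  have hof : PySem.Dict.ofList data
      = data.foldl (fun nd (p : String × String) => nd.insert p.1 p.2) PySem.Dict.empty := rfl
  have hnd : ((PySem.Dict.ofList data).items.map Prod.fst).Nodup := by
    have := PySem.Dict.nodup_keys_ofList (ps := data) (κ := String) (ν := String)
    simpa [PySem.Dict.keys] using this
  rw [pv_invariant data PySem.Dict.empty PySem.Dict.empty (by rfl), ← hof]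
  exact (pv_splice (PySem.Dict.ofList data).items hnd).symm
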